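-- pv_equiv track=rewrite | github.com/tomas-sys96/advent-of-code | day_11/part_01/main.py | get_galaxy_coordinates
-- ===== SOURCE A (Python) =====
-- from collections import namedtuple
--
-- GALAXY: str = "#"
--
-- EMPTY_SPACE: str = "."
--
-- Coordinate: namedtuple = namedtuple(typename="Coordinate", field_names=["row", "column"])
--
-- def insert_empty_row(rows: list[str], row_index: int) -> list[str]:
--     rows.insert(row_index, EMPTY_SPACE * len(rows[row_index]))
--
--     return rows
--
-- def insert_empty_column(rows: list[str], column_index: int) -> list[str]:
--     for row_index in range(len(rows)):
--         rows[row_index] = rows[row_index][:column_index] + EMPTY_SPACE + rows[row_index][column_index:]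
--
--     return rows
--
-- def double_rows(rows: list[str]) -> list[str]:
--     for row_index in reversed(range(len(rows))):
--         if GALAXY not in rows[row_index]:
--             # Insert an empty row
--             rows = insert_empty_row(rows=rows, row_index=row_index)
--
--     return rows
--
-- def double_columns(rows: list[str]) -> list[str]:
--     for column_index in reversed(range(len(rows[0]))):
--         if not any([row[column_index] == GALAXY for row in rows]):
--             # Insert an empty column
--             rows = insert_empty_column(rows=rows, column_index=column_index)
--
--     return rows
--
-- def double_empty_lines(rows: list[str]) -> list[str]:
--     rows = double_rows(rows=rows)
--     return double_columns(rows=rows)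
--
-- def get_galaxy_coordinates(rows: list[str]) -> list[Coordinate]:
--     expanded_rows: list[str] = double_empty_lines(rows=rows)
--     coordinates: list[Coordinate] = []
--
--     for row_index, row in enumerate(expanded_rows):
--         for column_index, character in enumerate(row):
--             if character == GALAXY:
--                 coordinates.append(Coordinate(row=row_index, column=column_index))
--
--     return coordinates
-- ===== SOURCE B (Python) =====
-- GALAXY: str = "#"
--
-- def get_galaxy_coordinates(rows: list[str]) -> list:
--     # One pass with prefix counts of galaxy-free columns/rows instead of
--     # materialising the expanded grid (A also mutates its argument; B does not).
--     width = len(rows[0])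
--     col_off = [0]
--     for c in range(width):
--         col_off.append(col_off[-1] + (1 if all(row[c] != GALAXY for row in rows) else 0))
--     coordinates = []
--     row_off = 0
--     for r, row in enumerate(rows):
--         if GALAXY not in row:
--             row_off += 1
--             continue
--         for c, ch in enumerate(row):
--             if ch == GALAXY:
--                 coordinates.append((r + row_off, c + col_off[min(c + 1, width)]))
--     return coordinates
-- ===== Notes on version B (the rewrite author's own statement) =====
-- stated objective: faster
-- what changed: B never builds the expanded grid: it counts galaxy-free rows/columns once (prefix sums of empty columns) and offsets each galaxy's coordinates in a single pass, instead of A's repeated row/column insertions that rebuild every row string per inserted column.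
import Mathlib
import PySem

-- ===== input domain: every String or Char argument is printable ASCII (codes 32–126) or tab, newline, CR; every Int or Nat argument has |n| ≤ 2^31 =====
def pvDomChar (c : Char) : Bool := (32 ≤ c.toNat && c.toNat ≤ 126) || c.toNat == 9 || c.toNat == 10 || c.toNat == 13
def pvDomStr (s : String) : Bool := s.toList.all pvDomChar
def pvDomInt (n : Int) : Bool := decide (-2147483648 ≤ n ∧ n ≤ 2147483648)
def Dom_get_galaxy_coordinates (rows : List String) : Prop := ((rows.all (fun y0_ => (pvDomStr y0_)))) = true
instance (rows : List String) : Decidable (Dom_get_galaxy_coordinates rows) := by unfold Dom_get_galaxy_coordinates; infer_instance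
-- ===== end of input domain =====

-- B replaces A's grid expansion by one pass with prefix counts of galaxy-free
-- rows/columns (asymptotically faster); equivalence is about the RETURN value only:
-- Python A mutates its argument list in place, B does not.

-- ===== PORT A =====
def pvDots (n : Nat) : String := String.ofList (List.replicate n '.')

def insert_empty_row (rows : List String) (row_index : Int) : List String :=
  PySem.List.insert rows row_index
    (pvDots (PySem.Str.len (PySem.List.pyGetD rows row_index "")).toNat)

def insert_empty_column (rows : List String) (column_index : Int) : List String :=
  (PySem.List.pyRange 0 (rows.length : Int)).foldl
    (fun rs r =>
      rs.set r.toNat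
        (PySem.Str.slice (PySem.List.pyGetD rs r "") none (some column_index) ++ "." ++
         PySem.Str.slice (PySem.List.pyGetD rs r "") (some column_index) none))
    rows

def double_rows (rows : List String) : List String :=
  ((PySem.List.pyRange 0 (rows.length : Int)).reverse).foldl
    (fun rs i =>
      if PySem.Str.isIn "#" (PySem.List.pyGetD rs i "") then rs else insert_empty_row rs i)
    rows

def double_columns (rows : List String) : List String :=
  ((PySem.List.pyRange 0 (PySem.Str.len (PySem.List.pyGetD rows 0 ""))).reverse).foldl
    (fun rs c =>
      if (rs.map (fun row => decide (PySem.Str.pyGet? row c = some '#'))).any id then rs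
      else insert_empty_column rs c)
    rows

def double_empty_lines (rows : List String) : List String :=
  double_columns (double_rows rows)

def get_galaxy_coordinates (rows : List String) : List (Int × Int) :=
  let expanded_rows := double_empty_lines rows
  (PySem.List.enumerate expanded_rows).foldl
    (fun coords p =>
      (PySem.List.enumerate p.2.toList).foldl
        (fun cs q => if q.2 = '#' then cs ++ [(p.1, q.1)] else cs) coords)
    []

-- ===== PORT B =====
def get_galaxy_coordinates_alt (rows : List String) : List (Int × Int) :=
  let width : Int := PySem.Str.len (PySem.List.pyGetD rows 0 "")
  let col_off : List Int :=
    (PySem.List.pyRange 0 width).foldl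
      (fun acc c =>
        acc ++ [PySem.List.pyGetD acc (-1) 0 +
          (if rows.all (fun row => decide (¬ PySem.Str.pyGet? row c = some '#')) then 1 else 0)])
      [0]
  ((PySem.List.enumerate rows).foldl
    (fun (st : List (Int × Int) × Int) p =>
      if PySem.Str.isIn "#" p.2 = false then (st.1, st.2 + 1)
      else
        ((PySem.List.enumerate p.2.toList).foldl
          (fun cs q =>
            if q.2 = '#' then
              cs ++ [(p.1 + st.2, q.1 + PySem.List.pyGetD col_off (min (q.1 + 1) width) 0)]
            else cs) st.1, st.2))
    ([], 0)).1

-- ===== PRECONDITION & SPEC =====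
-- Pre_ excludes exactly the inputs where Python A raises IndexError: the empty
-- list (rows[0]) and grids where some row is shorter than the first row
-- (row[column_index] in double_columns).
def Pre_get_galaxy_coordinates (rows : List String) : Prop :=
  rows ≠ [] ∧ ∀ r ∈ rows, PySem.Str.len (rows.headD "") ≤ PySem.Str.len r
instance (rows : List String) : Decidable (Pre_get_galaxy_coordinates rows) := by
  unfold Pre_get_galaxy_coordinates; infer_instance
def pvWitness_get_galaxy_coordinates : List String := ["#.", "..."]

def Spec_get_galaxy_coordinates (rows : List String) (out : List (Int × Int)) : Prop := out = get_galaxy_coordinates_alt rows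
instance (rows : List String) (out : List (Int × Int)) : Decidable (Spec_get_galaxy_coordinates rows out) := by unfold Spec_get_galaxy_coordinates; infer_instance

-- ===== CLAIM (what is proved, stated in full; the proofs are below) =====
def Claim_equal_get_galaxy_coordinates : Prop := ∀ (rows : List String), Dom_get_galaxy_coordinates rows → Pre_get_galaxy_coordinates rows → Spec_get_galaxy_coordinates rows (get_galaxy_coordinates rows)

-- ===== LEMMAS AND PROOFS =====

-- abstract model of A's expansion (proof-only helpers)
def pvW (rows : List String) : Nat := (PySem.List.pyGetD rows 0 "").toList.length

-- pvE rows: per column c < pvW rows, whether the column is galaxy-free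
def pvE (rows : List String) : List Bool :=
  (List.range (pvW rows)).map (fun c => rows.all (fun row => !decide (row.toList[c]? = some '#')))

def pvCnt (E : List Bool) : Nat := E.countP id

-- one row of A's row-doubling: itself, preceded by a dot row when galaxy-free
def pvFExp (s : String) : List String :=
  if PySem.Str.isIn "#" s then [s] else [pvDots s.toList.length, s]

-- A's column insertion, abstractly: '.' before every column marked true
def pvExpand : List Bool → List Char → List Char
  | [], l => l
  | _ :: _, [] => []
  | b :: E, ch :: l => if b then '.' :: ch :: pvExpand E l else ch :: pvExpand E l

-- positions of '#' in a row
def pvGals : List Char → List Nat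
  | [] => []
  | ch :: l => (if ch = '#' then [0] else []) ++ (pvGals l).map (· + 1)

-- canonical galaxy list of A's expanded grid (row start index t)
def pvCanon (E : List Bool) : List String → Int → List (Int × Int)
  | [], _ => []
  | s :: rest, t =>
      (pvGals (pvExpand E s.toList)).map (fun (k : Nat) => (t, (k : Int))) ++
      pvCanon E rest (t + if PySem.Str.isIn "#" s then 1 else 2)

-- canonical galaxy list of B's single pass (row index r, row offset ro)
def pvCanonB (co : List Int) (w : Int) : List String → Int → Int → List (Int × Int)
  | [], _, _ => []
  | s :: rest, r, ro =>
      if PySem.Str.isIn "#" s = false then pvCanonB co w rest (r + 1) (ro + 1)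
      else (pvGals s.toList).map
             (fun (k : Nat) => (r + ro, (k : Int) + PySem.List.pyGetD co (min ((k : Int) + 1) w) 0)) ++
           pvCanonB co w rest (r + 1) ro

theorem pv_isIn_hash (s : String) : PySem.Str.isIn "#" s = true ↔ '#' ∈ s.toList := by
  rw [PySem.Str.isIn_iff_infix]
  simpa using List.singleton_infix_iff '#' s.toList

theorem pv_toList_dots (n : Nat) : (pvDots n).toList = List.replicate n '.' := by
  simp [pvDots]

-- ---- row doubling ----

theorem pv_dr_aux (n : Nat) : ∀ (a : Nat) (rows : List String), a + n = rows.length →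
    List.foldr
      (fun (k : Nat) rs => if PySem.Str.isIn "#" (PySem.List.pyGetD rs (k : Int) "") then rs
                   else insert_empty_row rs (k : Int))
      rows (List.range' a n)
    = rows.take a ++ (rows.drop a).flatMap pvFExp := by
  induction n with
  | zero =>
      intro a rows h
      rw [List.range'_zero, List.foldr_nil, List.drop_of_length_le (by omega),
        List.take_of_length_le (by omega)]
      simp
  | succ n ih =>
      intro a rows h
      have ha : a < rows.length := by omega
      rw [List.range'_succ, List.foldr_cons, ih (a + 1) rows (by omega)]
      set S := rows.take (a + 1) ++ (rows.drop (a + 1)).flatMap pvFExp with hSdef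
      have htake : rows.take (a + 1) = rows.take a ++ [rows[a]] := by
        rw [List.take_succ, List.getElem?_eq_getElem ha]
        rfl
      have hlen1 : (rows.take (a + 1)).length = a + 1 := by
        simp [List.length_take]; omega
      have hget : PySem.List.pyGetD S (a : Int) "" = rows[a] := by
        rw [PySem.List.pyGetD_natCast, List.getD_eq_getElem?_getD, hSdef,
          List.getElem?_append_left (by omega), htake,
          List.getElem?_append_right (by rw [List.length_take]; exact Nat.min_le_left _ _)]
        simp [List.length_take, Nat.min_eq_left (show a ≤ rows.length by omega)]
      have hdrop : rows.drop a = rows[a] :: rows.drop (a + 1) := List.drop_eq_getElem_cons ha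
      by_cases hg : PySem.Str.isIn "#" rows[a] = true
      · rw [if_pos (by rw [hget]; exact hg)]
        rw [hSdef, hdrop, List.flatMap_cons,
          show pvFExp rows[a] = [rows[a]] from by unfold pvFExp; rw [if_pos hg], htake]
        simp only [List.append_assoc, List.singleton_append]
      · rw [if_neg (by rw [hget]; simpa using hg)]
        unfold insert_empty_row
        rw [hget, PySem.Str.len_eq, Int.toNat_natCast]
        have hle : a ≤ S.length := by
          rw [hSdef, List.length_append, hlen1]; omega
        rw [PySem.List.insert_natCast S a _ hle]
        have hSt : S.take a = rows.take a := by
          rw [hSdef, List.take_append_of_le_length (by omega), List.take_take,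
            Nat.min_eq_left (by omega)]
        have hSd : S.drop a = rows[a] :: (rows.drop (a + 1)).flatMap pvFExp := by
          rw [hSdef, List.drop_append_of_le_length (by omega), List.drop_take,
            show a + 1 - a = 1 from by omega, hdrop, List.take_succ_cons, List.take_zero]
          rfl
        rw [hSt, hSd, hdrop, List.flatMap_cons,
          show pvFExp rows[a] = [pvDots rows[a].toList.length, rows[a]] from by
            unfold pvFExp; rw [if_neg hg]]
        simp

theorem pv_dr_char (rows : List String) : double_rows rows = rows.flatMap pvFExp := by
  unfold double_rows
  rw [PySem.List.pyRange_zero_natCast, ← List.map_reverse, List.foldl_map,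
    List.foldl_reverse, List.range_eq_range']
  simpa using pv_dr_aux rows.length 0 rows (by omega)

-- ---- column doubling ----

theorem pv_iec_aux (g : String → String) :
    ∀ (l2 l1 : List String),
    List.foldl (fun rs (k : Nat) => rs.set (k : Int).toNat (g (PySem.List.pyGetD rs (k : Int) "")))
      (l1 ++ l2) (List.range' l1.length l2.length)
    = l1 ++ l2.map g := by
  intro l2
  induction l2 with
  | nil => intro l1; simp
  | cons x l2' ih =>
      intro l1
      rw [List.length_cons, List.range'_succ, List.foldl_cons]
      have hget : PySem.List.pyGetD (l1 ++ x :: l2') (l1.length : Int) "" = x := by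
        rw [PySem.List.pyGetD_natCast, List.getD_eq_getElem?_getD,
          List.getElem?_append_right (le_refl _)]
        simp
      rw [hget, Int.toNat_natCast]
      have hset : (l1 ++ x :: l2').set l1.length (g x) = (l1 ++ [g x]) ++ l2' := by
        simp [List.set_append]
      rw [hset]
      have := ih (l1 ++ [g x])
      simpa using this

theorem pv_iec_char (rs : List String) (c : Int) :
    insert_empty_column rs c
    = rs.map (fun s =>
        PySem.Str.slice s none (some c) ++ "." ++ PySem.Str.slice s (some c) none) := by
  unfold insert_empty_column
  rw [PySem.List.pyRange_zero_natCast, List.foldl_map, List.range_eq_range']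
  simpa using pv_iec_aux
    (fun s => PySem.Str.slice s none (some c) ++ "." ++ PySem.Str.slice s (some c) none) rs []

theorem pv_colF_toList (s : String) (a : Nat) :
    (PySem.Str.slice s none (some (a : Int)) ++ "." ++ PySem.Str.slice s (some (a : Int)) none).toList
    = s.toList.take a ++ '.' :: s.toList.drop a := by
  rw [String.toList_append, String.toList_append, PySem.Str.toList_slice, PySem.Str.toList_slice]
  simp [PySem.Chars.slice_eq_listSlice, PySem.List.slice_to s.toList (by omega : (0:Int) ≤ (a:Int)),
    PySem.List.slice_from s.toList (by omega : (0:Int) ≤ (a:Int))]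

theorem pv_dc_aux (rs0 : List String) (E : List Bool)
    (hEdef : ∀ c (hc : c < E.length),
      E[c] = rs0.all (fun row => !decide (row.toList[c]? = some '#')))
    (hlen : ∀ s ∈ rs0, E.length ≤ s.toList.length) :
    ∀ (n a : Nat), a + n = E.length →
    List.foldr
      (fun (k : Nat) rs =>
        if (rs.map (fun row => decide (PySem.Str.pyGet? row (k : Int) = some '#'))).any id
        then rs else insert_empty_column rs (k : Int))
      rs0 (List.range' a n)
    = rs0.map (fun s => String.ofList (s.toList.take a ++ pvExpand (E.drop a) (s.toList.drop a))) := by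
  intro n
  induction n with
  | zero =>
      intro a h
      rw [List.range'_zero, List.foldr_nil,
        show E.drop a = [] from by rw [List.drop_of_length_le (by omega)]]
      have h1 : ∀ s ∈ rs0,
          String.ofList (s.toList.take a ++ pvExpand [] (s.toList.drop a)) = id s := by
        intro s hs
        simp [pvExpand]
      rw [List.map_congr_left h1, List.map_id]
  | succ n ih =>
      intro a h
      have ha : a < E.length := by omega
      rw [List.range'_succ, List.foldr_cons, ih (a + 1) (by omega)]
      set S := rs0.map (fun s =>
        String.ofList (s.toList.take (a + 1) ++ pvExpand (E.drop (a + 1)) (s.toList.drop (a + 1)))) with hSdef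
      -- reading column a of the current state gives the original column a
      have hread : ∀ s ∈ rs0,
          (String.ofList (s.toList.take (a + 1) ++ pvExpand (E.drop (a + 1)) (s.toList.drop (a + 1)))).toList[a]?
          = s.toList[a]? := by
        intro s hs
        have hls := hlen s hs
        have h1 : a < (s.toList.take (a + 1)).length := by
          rw [List.length_take]; omega
        rw [String.toList_ofList, List.getElem?_append_left h1,
          List.getElem?_take_of_lt (by omega : a < a + 1)]
      have hcond : (S.map (fun row => decide (PySem.Str.pyGet? row (a : Int) = some '#'))).any id
          = !E[a] := by
        rw [hEdef a ha, hSdef, List.map_map,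
          List.map_congr_left (g := fun s => decide (s.toList[a]? = some '#'))
            (by intro s hs
                simp only [Function.comp, PySem.Str.pyGet?_natCast]
                rw [hread s hs]),
          List.any_map, List.any_eq_not_all_not]
        simp [Function.comp]
      -- per-row facts used in both branches
      have hexp : ∀ s, ∀ hs : s ∈ rs0,
          s.toList.take a ++ pvExpand (E.drop a) (s.toList.drop a)
          = s.toList.take a ++ (if E[a] then ('.' :: s.toList[a]'(by have := hlen s hs; omega) :: pvExpand (E.drop (a + 1)) (s.toList.drop (a + 1)))
              else (s.toList[a]'(by have := hlen s hs; omega) :: pvExpand (E.drop (a + 1)) (s.toList.drop (a + 1)))) := by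
        intro s hs
        have hls := hlen s hs
        rw [List.drop_eq_getElem_cons (l := E) ha, List.drop_eq_getElem_cons (by omega : a < s.toList.length)]
        by_cases hb : E[a] = true <;> simp [pvExpand, hb]
      by_cases hb : E[a] = true
      · -- column a is galaxy-free: A inserts a '.' column
        rw [hcond, hb, if_neg (by simp)]
        rw [pv_iec_char, hSdef, List.map_map]
        apply List.map_congr_left
        intro s hs
        have hls := hlen s hs
        simp only [Function.comp]
        apply String.toList_inj.mp
        rw [pv_colF_toList, String.toList_ofList, String.toList_ofList]
        have hlt : (s.toList.take (a + 1)).length = a + 1 := by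
          rw [List.length_take]; omega
        rw [List.take_append_of_le_length (i := a) (l₁ := s.toList.take (a + 1))
              (l₂ := pvExpand (E.drop (a + 1)) (s.toList.drop (a + 1))) (by omega),
          List.take_take, Nat.min_eq_left (show a ≤ a + 1 by omega),
          List.drop_append_of_le_length (i := a) (l₁ := s.toList.take (a + 1))
              (l₂ := pvExpand (E.drop (a + 1)) (s.toList.drop (a + 1))) (by omega)]
        rw [hexp s hs, hb, if_pos rfl]
        have haS : a < s.toList.length := by omega
        have hdt : (s.toList.take (a + 1)).drop a = [s.toList[a]'haS] := by
          rw [List.drop_take, show a + 1 - a = 1 from by omega,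
            List.drop_eq_getElem_cons haS, List.take_succ_cons, List.take_zero]
        rw [hdt]
        simp
      · -- column a has a galaxy: A keeps the grid
        have hb' : E[a] = false := by simpa using hb
        rw [hcond, hb', if_pos (by simp)]
        rw [hSdef]
        apply List.map_congr_left
        intro s hs
        have hls := hlen s hs
        have haS : a < s.toList.length := by omega
        apply String.toList_inj.mp
        rw [String.toList_ofList, String.toList_ofList, hexp s hs, hb',
          if_neg (by simp), List.take_succ, List.getElem?_eq_getElem haS]
        simp only [Option.toList_some, List.append_assoc, List.singleton_append]

theorem pv_dc_char (rs0 : List String)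
    (hlen : ∀ s ∈ rs0, pvW rs0 ≤ s.toList.length) :
    double_columns rs0 = rs0.map (fun s => String.ofList (pvExpand (pvE rs0) s.toList)) := by
  unfold double_columns
  rw [PySem.Str.len_eq, show ((PySem.List.pyGetD rs0 0 "").toList.length : Int) = ((pvW rs0 : Nat) : Int) from rfl,
    PySem.List.pyRange_zero_natCast, ← List.map_reverse, List.foldl_map,
    List.foldl_reverse, List.range_eq_range']
  have hE : (pvE rs0).length = pvW rs0 := by simp [pvE]
  have := pv_dc_aux rs0 (pvE rs0)
    (by intro c hc
        rw [hE] at hc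
        simp [pvE, hc])
    (by intro s hs; rw [hE]; exact hlen s hs)
    (pvW rs0) 0 (by rw [hE]; omega)
  simpa using this

-- ---- galaxy positions ----

theorem pv_pyGetD_zero {α : Type} (h : α) (t : List α) (d : α) :
    PySem.List.pyGetD (h :: t) 0 d = h := by
  rw [PySem.List.pyGetD_of_nonneg _ _ (le_refl 0)]
  rfl

theorem pv_gals_inner (t : Int) : ∀ (l : List Char) (ci : Int) (acc : List (Int × Int)),
    (PySem.List.enumerate l ci).foldl
      (fun cs q => if q.2 = '#' then cs ++ [(t, q.1)] else cs) acc
    = acc ++ (pvGals l).map (fun (k : Nat) => (t, ci + (k : Int))) := by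
  intro l
  induction l with
  | nil => intro ci acc; simp [PySem.List.enumerate, pvGals]
  | cons ch l' ih =>
      intro ci acc
      rw [PySem.List.enumerate_cons, List.foldl_cons, ih]
      have hmap : (pvGals (ch :: l')).map (fun (k : Nat) => (t, ci + (k : Int)))
          = (if ch = '#' then [(t, ci)] else []) ++
            (pvGals l').map (fun (k : Nat) => (t, (ci + 1) + (k : Int))) := by
        simp only [pvGals]
        by_cases hch : ch = '#'
        · rw [hch, if_pos rfl]
          simp only [List.map_append, List.map_cons, List.map_nil, List.map_map]
          congr 1
          · norm_num
          · apply List.map_congr_left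
            intro k _
            simp only [Function.comp_apply]
            congr 1
            push_cast
            ring
        · rw [if_neg hch, if_neg hch]
          simp only [List.nil_append, List.map_map]
          apply List.map_congr_left
          intro k _
          simp only [Function.comp_apply]
          congr 1
          push_cast
          ring
      rw [hmap]
      by_cases hch : ch = '#' <;> simp [hch]


theorem pv_gals_innerB (rr : Int) (F : Int → Int) : ∀ (l : List Char) (ci : Int) (acc : List (Int × Int)),
    (PySem.List.enumerate l ci).foldl
      (fun cs q => if q.2 = '#' then cs ++ [(rr, q.1 + F q.1)] else cs) acc
    = acc ++ (pvGals l).map (fun (k : Nat) => (rr, (ci + (k : Int)) + F (ci + (k : Int)))) := by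
  intro l
  induction l with
  | nil => intro ci acc; simp [PySem.List.enumerate, pvGals]
  | cons ch l' ih =>
      intro ci acc
      rw [PySem.List.enumerate_cons, List.foldl_cons, ih]
      have hmap : (pvGals (ch :: l')).map (fun (k : Nat) => (rr, (ci + (k : Int)) + F (ci + (k : Int))))
          = (if ch = '#' then [(rr, ci + F ci)] else []) ++
            (pvGals l').map (fun (k : Nat) => (rr, ((ci + 1) + (k : Int)) + F ((ci + 1) + (k : Int)))) := by
        simp only [pvGals]
        by_cases hch : ch = '#'
        · rw [hch, if_pos rfl]
          simp only [List.map_append, List.map_cons, List.map_nil, List.map_map]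
          congr 1
          · norm_num
          · apply List.map_congr_left
            intro k _
            simp only [Function.comp_apply]
            push_cast
            rw [show ci + ((k : Int) + 1) = ci + 1 + (k : Int) from by ring]
        · rw [if_neg hch, if_neg hch]
          simp only [List.nil_append, List.map_map]
          apply List.map_congr_left
          intro k _
          simp only [Function.comp_apply]
          push_cast
          rw [show ci + ((k : Int) + 1) = ci + 1 + (k : Int) from by ring]
      rw [hmap]
      by_cases hch : ch = '#' <;> simp [hch]


theorem pv_mem_expand : ∀ (E : List Bool) (l : List Char) (c : Char),
    c ∈ pvExpand E l → c = '.' ∨ c ∈ l := by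
  intro E
  induction E with
  | nil => intro l c hc; exact Or.inr (by simpa [pvExpand] using hc)
  | cons b E ih =>
      intro l c hc
      cases l with
      | nil => simp [pvExpand] at hc
      | cons ch l' =>
          by_cases hb : b
          · simp only [pvExpand, hb, if_true, List.mem_cons] at hc
            rcases hc with h | h | h
            · exact Or.inl h
            · exact Or.inr (h ▸ List.mem_cons_self)
            · rcases ih l' c h with h' | h'
              · exact Or.inl h'
              · exact Or.inr (List.mem_cons_of_mem _ h')
          · have hb' : b = false := by simpa using hb
            simp only [pvExpand, hb', Bool.false_eq_true, if_false, List.mem_cons] at hc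
            rcases hc with h | h
            · exact Or.inr (h ▸ List.mem_cons_self)
            · rcases ih l' c h with h' | h'
              · exact Or.inl h'
              · exact Or.inr (List.mem_cons_of_mem _ h')


theorem pv_gals_nil_of : ∀ (l : List Char), (∀ c ∈ l, c ≠ '#') → pvGals l = [] := by
  intro l
  induction l with
  | nil => intro _; rfl
  | cons ch l' ih =>
      intro h
      simp [pvGals, h ch List.mem_cons_self,
        ih (fun c hc => h c (List.mem_cons_of_mem _ hc))]


theorem pv_gals_expand_nil (E : List Bool) (l : List Char) (h : '#' ∉ l) :
    pvGals (pvExpand E l) = [] := by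
  apply pv_gals_nil_of
  intro c hc
  rcases pv_mem_expand E l c hc with h1 | h1
  · simp [h1]
  · intro hne; exact h (hne ▸ h1)

theorem pv_gals_expand : ∀ (E : List Bool) (l : List Char),
    (∀ k (hk : k < E.length), E[k] = true → l[k]? ≠ some '#') →
    pvGals (pvExpand E l) = (pvGals l).map (fun c => c + pvCnt (E.take c.succ)) := by
  intro E
  induction E with
  | nil =>
      intro l h
      simp only [pvExpand, List.take_nil]
      have : ∀ c ∈ pvGals l, c + pvCnt [] = id c := by intro c _; simp [pvCnt]
      rw [List.map_congr_left this, List.map_id]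
  | cons b E ih =>
      intro l h
      cases l with
      | nil => cases b <;> simp [pvExpand, pvGals]
      | cons ch l' =>
          have htail : ∀ k (hk : k < E.length), E[k] = true → l'[k]? ≠ some '#' := by
            intro k hk hE
            have := h (k + 1) (by simpa using Nat.succ_lt_succ hk) (by simpa using hE)
            simpa using this
          by_cases hb : b
          · have hch : ch ≠ '#' := by
              intro hc
              exact h 0 (by simp) (by simpa using hb) (by simp [hc]) 
            simp only [pvExpand, hb, if_true]
            show pvGals ('.' :: ch :: pvExpand E l') = _
            simp only [pvGals, if_neg (by decide : ¬ ('.' : Char) = '#'), if_neg hch,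
              List.nil_append, List.map_map, ih l' htail]
            apply List.map_congr_left
            intro c _
            simp only [Function.comp_apply, Nat.succ_eq_add_one]
            rw [show c + 1 + 1 = (c + 1) + 1 from rfl, List.take_succ_cons]
            simp only [pvCnt, List.countP_cons, id_eq, hb]
            rw [if_pos trivial]
            omega
          · simp only [pvExpand, hb, if_false]
            show pvGals (ch :: pvExpand E l') = _
            simp only [pvGals, List.map_map, ih l' htail, List.map_append]
            have hb' : b = false := by simpa using hb
            congr 1
            · by_cases hch : ch = '#'
              · simp only [hch, if_pos rfl]
                simp [pvCnt, List.take_succ_cons, List.countP_cons, hb']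
              · simp [hch]
            apply List.map_congr_left
            intro c _
            simp only [Function.comp_apply, Nat.succ_eq_add_one, List.take_succ_cons]
            simp only [pvCnt, List.countP_cons, id_eq, hb']
            rw [if_neg (by decide : ¬ false = true)]
            omega

-- ---- B's prefix-sum list ----

theorem pv_getD_neg_one (l : List Int) (d : Int) (h : 0 < l.length) :
    PySem.List.pyGetD l (-1) d = l.getD (l.length - 1) d := by
  simp only [PySem.List.pyGetD, PySem.List.pyGet?, PySem.List.pyIdx?]
  rw [if_neg (by omega), if_pos (by omega : -(l.length : Int) ≤ -1)]
  norm_num [List.getD_eq_getElem?_getD]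

theorem pv_coff_aux (rows : List String) :
    ∀ (m : Nat), m ≤ pvW rows →
    List.foldl
      (fun acc (k : Nat) => acc ++ [PySem.List.pyGetD acc (-1) 0 +
        (if rows.all (fun row => decide (¬ PySem.Str.pyGet? row (k : Int) = some '#')) then 1 else 0)])
      [0] (List.range' 0 m)
    = (List.range (m + 1)).map (fun j => (pvCnt ((pvE rows).take j) : Int)) := by
  intro m
  induction m with
  | zero => intro _; simp [pvCnt]
  | succ m ih =>
      intro hm
      rw [List.range'_1_concat, List.foldl_append, ih (by omega), List.foldl_cons, List.foldl_nil]
      have hlenp : ((List.range (m + 1)).map (fun j => (pvCnt ((pvE rows).take j) : Int))).length = m + 1 := by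
        simp
      have hlast : PySem.List.pyGetD
          ((List.range (m + 1)).map (fun j => (pvCnt ((pvE rows).take j) : Int))) (-1) 0
          = (pvCnt ((pvE rows).take m) : Int) := by
        rw [pv_getD_neg_one _ _ (by rw [hlenp]; omega), hlenp, List.getD_eq_getElem?_getD,
          List.getElem?_map, List.getElem?_range (by omega)]
        rfl
      have hEm : m < (pvE rows).length := by simp [pvE]; omega
      have hcond : rows.all (fun row => decide (¬ PySem.Str.pyGet? row ((0 + m : Nat) : Int) = some '#'))
          = (pvE rows)[m] := by
        have : (pvE rows)[m]'hEm = rows.all (fun row => !decide (row.toList[m]? = some '#')) := by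
          simp [pvE]
        rw [this]
        apply List.all_congr rfl
        intro row
        simp [PySem.Str.pyGet?_natCast]
      rw [show ((0 + m : Nat) : Int) = ((m : Nat) : Int) from by norm_num] at hcond ⊢
      rw [hlast, hcond]
      have htk : (pvE rows).take (m + 1) = (pvE rows).take m ++ [(pvE rows)[m]'hEm] := by
        rw [List.take_succ, List.getElem?_eq_getElem hEm]
        rfl
      have hcnt : (pvCnt ((pvE rows).take (m + 1)) : Int)
          = (pvCnt ((pvE rows).take m) : Int) + (if (pvE rows)[m]'hEm then 1 else 0) := by
        rw [htk]
        simp only [pvCnt, List.countP_append, List.countP_cons, List.countP_nil, id_eq]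
        by_cases hbm : (pvE rows)[m]'hEm = true <;> simp [hbm]
      conv_rhs => rw [List.range_succ, List.map_append]
      simp only [List.map_cons, List.map_nil]
      rw [hcnt]

theorem pv_coff (rows : List String) :
    (PySem.List.pyRange 0 (PySem.Str.len (PySem.List.pyGetD rows 0 ""))).foldl
      (fun acc c => acc ++ [PySem.List.pyGetD acc (-1) 0 +
        (if rows.all (fun row => decide (¬ PySem.Str.pyGet? row c = some '#')) then 1 else 0)])
      [0]
    = (List.range (pvW rows + 1)).map (fun j => (pvCnt ((pvE rows).take j) : Int)) := by
  rw [PySem.Str.len_eq,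
    show ((PySem.List.pyGetD rows 0 "").toList.length : Int) = ((pvW rows : Nat) : Int) from rfl,
    PySem.List.pyRange_zero_natCast, List.foldl_map, List.range_eq_range']
  exact pv_coff_aux rows (pvW rows) (le_refl _)

-- ---- outer loops ----

theorem pv_hash_not_mem_dots (n : Nat) : '#' ∉ (pvDots n).toList := by
  rw [pv_toList_dots]
  intro hmem
  exact absurd (List.mem_replicate.mp hmem).2 (by decide)

theorem pv_ostep_nil (tt : Int) (acc : List (Int × Int)) (l : List Char) (h : pvGals l = []) :
    (PySem.List.enumerate l 0).foldl
      (fun cs q => if q.2 = '#' then cs ++ [(tt, q.1)] else cs) acc = acc := by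
  rw [pv_gals_inner tt l 0 acc, h]
  simp

theorem pv_outerA (E : List Bool) : ∀ (rows' : List String) (t : Int) (acc : List (Int × Int)),
    (PySem.List.enumerate
        (rows'.flatMap (fun s => (pvFExp s).map (fun u => String.ofList (pvExpand E u.toList)))) t).foldl
      (fun coords p =>
        (PySem.List.enumerate p.2.toList).foldl
          (fun cs q => if q.2 = '#' then cs ++ [(p.1, q.1)] else cs) coords)
      acc
    = acc ++ pvCanon E rows' t := by
  intro rows'
  induction rows' with
  | nil => intro t acc; simp [pvCanon, PySem.List.enumerate]
  | cons s rest ih =>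
      intro t acc
      rw [List.flatMap_cons]
      by_cases hg : PySem.Str.isIn "#" s = true
      · rw [show pvFExp s = [s] from by unfold pvFExp; rw [if_pos hg]]
        simp only [List.map_cons, List.map_nil, List.singleton_append]
        rw [PySem.List.enumerate_cons, List.foldl_cons, ih]
        simp only [String.toList_ofList]
        rw [pv_gals_inner]
        have hc : pvCanon E (s :: rest) t
            = (pvGals (pvExpand E s.toList)).map (fun (k : Nat) => (t, (k : Int))) ++
              pvCanon E rest (t + 1) := by
          simp only [pvCanon, hg, if_true]
        rw [hc]
        simp
      · have hgf : PySem.Str.isIn "#" s = false := by simpa using hg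
        have hnm : '#' ∉ s.toList := fun hm => hg ((pv_isIn_hash s).mpr hm)
        rw [show pvFExp s = [pvDots s.toList.length, s] from by unfold pvFExp; rw [if_neg hg]]
        simp only [List.map_cons, List.map_nil, List.cons_append, List.nil_append]
        rw [PySem.List.enumerate_cons, List.foldl_cons, PySem.List.enumerate_cons,
          List.foldl_cons, ih]
        simp only [String.toList_ofList]
        rw [pv_ostep_nil t acc _ (pv_gals_expand_nil E _ (pv_hash_not_mem_dots _)),
          pv_ostep_nil (t + 1) acc _ (pv_gals_expand_nil E _ hnm)]
        have hc : pvCanon E (s :: rest) t = pvCanon E rest (t + 2) := by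
          simp only [pvCanon, hgf, pv_gals_expand_nil E s.toList hnm, List.map_nil,
            List.nil_append, Bool.false_eq_true, if_false]
        rw [hc, show t + 1 + 1 = t + 2 from by ring]

theorem pv_outerB (co : List Int) (w : Int) : ∀ (rows' : List String) (r ro : Int) (acc : List (Int × Int)),
    ((PySem.List.enumerate rows' r).foldl
      (fun (st : List (Int × Int) × Int) p =>
        if PySem.Str.isIn "#" p.2 = false then (st.1, st.2 + 1)
        else
          ((PySem.List.enumerate p.2.toList).foldl
            (fun cs q =>
              if q.2 = '#' then
                cs ++ [(p.1 + st.2, q.1 + PySem.List.pyGetD co (min (q.1 + 1) w) 0)]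
              else cs) st.1, st.2))
      (acc, ro)).1
    = acc ++ pvCanonB co w rows' r ro := by
  intro rows'
  induction rows' with
  | nil => intro r ro acc; simp [pvCanonB, PySem.List.enumerate]
  | cons s rest ih =>
      intro r ro acc
      rw [PySem.List.enumerate_cons, List.foldl_cons]
      by_cases hg : PySem.Str.isIn "#" s = false
      · simp only []
        rw [if_pos hg, ih]
        simp only [pvCanonB, hg, if_true]
      · simp only []
        rw [if_neg hg, pv_gals_innerB (r + ro) (fun x => PySem.List.pyGetD co (min (x + 1) w) 0), ih]
        have hc : pvCanonB co w (s :: rest) r ro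
            = (pvGals s.toList).map
                (fun (k : Nat) => (r + ro, (k : Int) + PySem.List.pyGetD co (min ((k : Int) + 1) w) 0)) ++
              pvCanonB co w rest (r + 1) ro := by
          simp only [pvCanonB, if_neg hg]
        rw [hc]
        simp

-- ---- A's canonical list equals B's canonical list ----

theorem pv_canon_eq (rows : List String) (hlen : ∀ s ∈ rows, pvW rows ≤ s.toList.length) :
    ∀ (rows' : List String), (∀ s ∈ rows', s ∈ rows) → ∀ (r ro : Int),
    pvCanon (pvE rows) rows' (r + ro)
    = pvCanonB ((List.range (pvW rows + 1)).map (fun j => (pvCnt ((pvE rows).take j) : Int)))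
        (pvW rows) rows' r ro := by
  intro rows'
  induction rows' with
  | nil => intro _ r ro; simp [pvCanon, pvCanonB]
  | cons s rest ih =>
      intro hsub r ro
      have hsmem := hsub s List.mem_cons_self
      have hsublen := hlen s hsmem
      have hWE : (pvE rows).length = pvW rows := by simp [pvE]
      have hE : ∀ k (hk : k < (pvE rows).length), (pvE rows)[k] = true → s.toList[k]? ≠ some '#' := by
        intro k hk hEk
        have hgete : (pvE rows)[k]'hk = rows.all (fun row => !decide (row.toList[k]? = some '#')) := by
          simp [pvE]
        rw [hgete] at hEk
        have := (List.all_eq_true.mp hEk) s hsmem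
        simpa using this
      have hlook : ∀ k : Nat,
          PySem.List.pyGetD
            ((List.range (pvW rows + 1)).map (fun j => (pvCnt ((pvE rows).take j) : Int)))
            (min ((k : Int) + 1) ((pvW rows : Nat) : Int)) 0
          = (pvCnt ((pvE rows).take (k + 1)) : Int) := by
        intro k
        rw [show ((k : Int) + 1) = (((k + 1 : Nat) : Nat) : Int) from by push_cast; ring,
          ← Nat.cast_min, PySem.List.pyGetD_natCast, List.getD_eq_getElem?_getD,
          List.getElem?_map, List.getElem?_range (by omega : min (k + 1) (pvW rows) < pvW rows + 1)]
        simp only [Option.map_some, Option.getD_some]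
        by_cases hk : k + 1 ≤ pvW rows
        · rw [Nat.min_eq_left hk]
        · rw [Nat.min_eq_right (by omega), List.take_of_length_le (by omega),
            List.take_of_length_le (by rw [hWE]; omega)]
      by_cases hg : PySem.Str.isIn "#" s = true
      · have hcA : pvCanon (pvE rows) (s :: rest) (r + ro)
            = (pvGals (pvExpand (pvE rows) s.toList)).map (fun (k : Nat) => (r + ro, (k : Int))) ++
              pvCanon (pvE rows) rest (r + ro + 1) := by
          simp only [pvCanon, hg, if_true]
        have hcB : pvCanonB ((List.range (pvW rows + 1)).map (fun j => (pvCnt ((pvE rows).take j) : Int)))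
              (pvW rows) (s :: rest) r ro
            = (pvGals s.toList).map
                (fun (k : Nat) => (r + ro, (k : Int) +
                  PySem.List.pyGetD
                    ((List.range (pvW rows + 1)).map (fun j => (pvCnt ((pvE rows).take j) : Int)))
                    (min ((k : Int) + 1) ((pvW rows : Nat) : Int)) 0)) ++
              pvCanonB ((List.range (pvW rows + 1)).map (fun j => (pvCnt ((pvE rows).take j) : Int)))
                (pvW rows) rest (r + 1) ro := by
          simp only [pvCanonB, hg, Bool.true_eq_false, if_false]
        rw [hcA, hcB, pv_gals_expand (pvE rows) s.toList hE, List.map_map]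
        congr 1
        · apply List.map_congr_left
          intro k _
          simp only [Function.comp_apply, Nat.succ_eq_add_one]
          rw [hlook k]
          simp
        · rw [show r + ro + 1 = (r + 1) + ro from by ring]
          exact ih (fun u hu => hsub u (List.mem_cons_of_mem _ hu)) (r + 1) ro
      · have hgf : PySem.Str.isIn "#" s = false := by simpa using hg
        have hnm : '#' ∉ s.toList := fun hm => hg ((pv_isIn_hash s).mpr hm)
        have hcA : pvCanon (pvE rows) (s :: rest) (r + ro)
            = pvCanon (pvE rows) rest (r + ro + 2) := by
          simp only [pvCanon, hgf, pv_gals_expand_nil (pvE rows) s.toList hnm, List.map_nil,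
            List.nil_append, Bool.false_eq_true, if_false]
        have hcB : pvCanonB ((List.range (pvW rows + 1)).map (fun j => (pvCnt ((pvE rows).take j) : Int)))
              (pvW rows) (s :: rest) r ro
            = pvCanonB ((List.range (pvW rows + 1)).map (fun j => (pvCnt ((pvE rows).take j) : Int)))
                (pvW rows) rest (r + 1) (ro + 1) := by
          simp only [pvCanonB, hgf, if_true]
        rw [hcA, hcB, show r + ro + 2 = (r + 1) + (ro + 1) from by ring]
        exact ih (fun u hu => hsub u (List.mem_cons_of_mem _ hu)) (r + 1) (ro + 1)

-- ---- from the original grid to the row-doubled grid ----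

theorem pv_fexp_len (s u : String) (hu : u ∈ pvFExp s) : u.toList.length = s.toList.length := by
  unfold pvFExp at hu
  by_cases hg : PySem.Str.isIn "#" s = true
  · rw [if_pos hg] at hu
    simp only [List.mem_singleton] at hu
    rw [hu]
  · rw [if_neg hg] at hu
    simp only [List.mem_cons, List.not_mem_nil, or_false] at hu
    rcases hu with h1 | h1
    · rw [h1, pv_toList_dots, List.length_replicate]
    · rw [h1]

theorem pv_W2 (h : String) (t : List String) :
    pvW ((h :: t).flatMap pvFExp) = pvW (h :: t) := by
  rw [List.flatMap_cons]
  unfold pvW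
  rw [pv_pyGetD_zero]
  unfold pvFExp
  by_cases hg : PySem.Str.isIn "#" h = true
  · rw [if_pos hg]
    simp only [List.cons_append]
    rw [pv_pyGetD_zero]
  · rw [if_neg hg]
    simp only [List.cons_append]
    rw [pv_pyGetD_zero, pv_toList_dots, List.length_replicate]

theorem pv_hlen2 (rows : List String) (hlen : ∀ s ∈ rows, pvW rows ≤ s.toList.length)
    (hW2 : pvW (rows.flatMap pvFExp) = pvW rows) :
    ∀ u ∈ rows.flatMap pvFExp, pvW (rows.flatMap pvFExp) ≤ u.toList.length := by
  intro u hu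
  rw [hW2]
  obtain ⟨s, hs, hu'⟩ := List.mem_flatMap.mp hu
  rw [pv_fexp_len s u hu']
  exact hlen s hs

theorem pv_E2 (rows : List String) (hW2 : pvW (rows.flatMap pvFExp) = pvW rows)
    (hlen : ∀ s ∈ rows, pvW rows ≤ s.toList.length) :
    pvE (rows.flatMap pvFExp) = pvE rows := by
  unfold pvE
  rw [hW2]
  apply List.map_congr_left
  intro c hc
  have hcW : c < pvW rows := List.mem_range.mp hc
  rw [Bool.eq_iff_iff, List.all_eq_true, List.all_eq_true]
  constructor
  · intro H row hrow
    refine H row (List.mem_flatMap.mpr ⟨row, hrow, ?_⟩)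
    unfold pvFExp
    by_cases hg : PySem.Str.isIn "#" row = true
    · rw [if_pos hg]; exact List.mem_singleton.mpr rfl
    · rw [if_neg hg]; exact List.mem_cons_of_mem _ (List.mem_singleton.mpr rfl)
  · intro H u hu
    obtain ⟨s, hs, hu'⟩ := List.mem_flatMap.mp hu
    unfold pvFExp at hu'
    by_cases hg : PySem.Str.isIn "#" s = true
    · rw [if_pos hg] at hu'
      rw [List.mem_singleton.mp hu']
      exact H s hs
    · rw [if_neg hg] at hu'
      simp only [List.mem_cons, List.not_mem_nil, or_false] at hu'
      rcases hu' with h1 | h1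
      · have hdc : u.toList[c]? = some '.' := by
          rw [h1, pv_toList_dots, List.getElem?_replicate,
            if_pos (lt_of_lt_of_le hcW (hlen s hs))]
        simp [hdc]
      · rw [h1]
        exact H s hs

-- ===== VERDICT (by name: the statement is the Claim_ definition above) =====
theorem get_galaxy_coordinates_spec : Claim_equal_get_galaxy_coordinates := by
  unfold Claim_equal_get_galaxy_coordinates
  intro rows hdom hpre
  unfold Spec_get_galaxy_coordinates
  obtain ⟨hne, hlenPre⟩ := hpre
  obtain ⟨h0, t0, rfl⟩ : ∃ h0 t0, rows = h0 :: t0 := by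
    cases rows with
    | nil => exact absurd rfl hne
    | cons h0 t0 => exact ⟨h0, t0, rfl⟩
  have hW0 : pvW (h0 :: t0) = h0.toList.length := by
    unfold pvW
    rw [pv_pyGetD_zero]
  have hlen : ∀ s ∈ (h0 :: t0), pvW (h0 :: t0) ≤ s.toList.length := by
    intro s hs
    have h1 := hlenPre s hs
    rw [PySem.Str.len_eq, PySem.Str.len_eq] at h1
    rw [hW0]
    exact_mod_cast (by simpa using h1)
  have hW2 : pvW ((h0 :: t0).flatMap pvFExp) = pvW (h0 :: t0) := pv_W2 h0 t0
  have hlen2 : ∀ u ∈ (h0 :: t0).flatMap pvFExp,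
      pvW ((h0 :: t0).flatMap pvFExp) ≤ u.toList.length := pv_hlen2 _ hlen hW2
  have hE2 : pvE ((h0 :: t0).flatMap pvFExp) = pvE (h0 :: t0) := pv_E2 _ hW2 hlen
  -- A side
  simp only [get_galaxy_coordinates, double_empty_lines]
  rw [pv_dr_char, pv_dc_char _ hlen2, hE2, List.map_flatMap, pv_outerA]
  -- B side
  simp only [get_galaxy_coordinates_alt]
  rw [pv_coff, pv_outerB]
  have hwidth : PySem.Str.len (PySem.List.pyGetD (h0 :: t0) 0 "") = ((pvW (h0 :: t0) : Nat) : Int) := by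
    rw [PySem.Str.len_eq]
    rfl
  rw [hwidth]
  simp only [List.nil_append]
  have := pv_canon_eq (h0 :: t0) hlen (h0 :: t0) (fun s hs => hs) 0 0
  simpa using this
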